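-- pv_equiv track=rewrite | github.com/leetakhotsamit/CS2020 | CS2020/a03/a03q2.py | removal
-- ===== SOURCE A (Python) =====
-- def removal(s):
--     '''
--     Returns the lower case form the the string with the removal of spaces,
--     non alphabetic characters and numbers
--
--     removal: Str -> None
--
--     requires:
--     * all non-alnum to be removed
--     * space to be removed
--     * string is in lower case
--     * numbers are removed
--
--     Examples:
--     removal("moM") -> None
--     and prints "mom"
--
--     removal("computers") -> None
--     and prints "computers"
--     '''
--     s = s.lower()
--     if len(s) == 0:
--         return ""
--     elif not s[0].isalnum():
--         return "" + removal(s[1:])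
--     elif s[0].isalpha():
--         return s[0] + removal(s[1:])
--     elif s[0].isdigit():
--         return "" + removal(s[1:])
--     else:
--         return removal(s[1:])
-- ===== SOURCE B (Python) =====
-- def removal(s):
--     t = s.lower()
--     out = ""
--     for c in t:
--         if c.isalpha():
--             out += c
--     return out
-- ===== Notes on version B (the rewrite author's own statement) =====
-- stated objective: simpler
-- what changed: Replaces A's head/tail recursion (which re-lowercases the remaining string and re-tests isalnum/isalpha/isdigit at every step) with one lower() call followed by a single iterative accumulator loop keeping alphabetic characters.
import Mathlib
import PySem

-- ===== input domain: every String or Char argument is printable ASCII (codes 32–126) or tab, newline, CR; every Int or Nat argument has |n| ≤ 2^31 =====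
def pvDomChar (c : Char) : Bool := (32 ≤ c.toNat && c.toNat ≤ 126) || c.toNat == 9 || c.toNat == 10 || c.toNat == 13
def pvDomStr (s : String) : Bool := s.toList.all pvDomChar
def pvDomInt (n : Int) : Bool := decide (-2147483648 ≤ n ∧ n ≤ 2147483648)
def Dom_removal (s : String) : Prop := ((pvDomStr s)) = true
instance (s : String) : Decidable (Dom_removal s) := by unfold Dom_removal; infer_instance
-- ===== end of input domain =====

-- B replaces A's head/tail recursion with one lowercasing pass followed by an iterative accumulator loop; equivalent, simpler.


-- ===== PORT A =====
-- A's recursion over the (re-)lowercased character list, branch order as in the Python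
def removalGo (cs : List Char) : List Char :=
  match h : PySem.Chars.lower cs with
  | [] => []
  | c :: rest =>
    if !(PySem.Chars.isalnum c) then [] ++ removalGo rest
    else if PySem.Chars.isalpha c then c :: removalGo rest
    else if PySem.Chars.isdigit c then [] ++ removalGo rest
    else removalGo rest
termination_by cs.length
decreasing_by
  all_goals
    have hl := congrArg List.length h
    simp [PySem.Chars.lower] at hl
    omega

def removal (s : String) : String := String.ofList (removalGo s.toList)

-- ===== PORT B =====
def removal_alt (s : String) : String :=
  let t := PySem.Chars.lower s.toList
  String.ofList (t.foldl (fun acc c => if PySem.Chars.isalpha c then acc ++ [c] else acc) [])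

-- ===== PRECONDITION & SPEC =====
def Spec_removal (s : String) (out : String) : Prop := out = removal_alt s
instance (s : String) (out : String) : Decidable (Spec_removal s out) := by unfold Spec_removal; infer_instance

-- ===== CLAIM (what is proved, stated in full; the proofs are below) =====
def Claim_equal_removal : Prop := ∀ (s : String), Dom_removal s → Spec_removal s (removal s)

-- ===== LEMMAS AND PROOFS =====

theorem lowerChar_idem (c : Char) :
    PySem.Chars.lowerChar (PySem.Chars.lowerChar c) = PySem.Chars.lowerChar c := by
  have hle : ∀ a b : Char, a ≤ b ↔ a.toNat ≤ b.toNat := by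
    intro a b
    rw [Char.le_def, UInt32.le_iff_toNat_le]
    exact Iff.rfl
  have hA : 'A'.toNat = 65 := rfl
  have hZ : 'Z'.toNat = 90 := rfl
  simp only [PySem.Chars.lowerChar, PySem.Chars.isupper, Bool.and_eq_true, decide_eq_true_eq]
  split_ifs with h1 h2
  · exfalso
    have ha := (hle _ _).mp h1.1
    have hb := (hle _ _).mp h1.2
    have hv : (c.toNat + 32).isValidChar := by
      constructor
      show c.toNat + 32 < 55296
      omega
    have ht : (Char.ofNat (c.toNat + 32)).toNat = c.toNat + 32 := by
      rw [Char.toNat_ofNat, if_pos hv]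
    have hb2 := (hle _ _).mp h2.2
    rw [ht] at hb2
    omega
  · rfl
  · rfl

theorem lower_idem (cs : List Char) :
    PySem.Chars.lower (PySem.Chars.lower cs) = PySem.Chars.lower cs := by
  simp [PySem.Chars.lower, Function.comp_def, lowerChar_idem]

theorem removalGo_eq_filter_aux : ∀ (n : ℕ) (cs : List Char), cs.length = n →
    removalGo cs = (PySem.Chars.lower cs).filter PySem.Chars.isalpha := by
  intro n
  induction n using Nat.strong_induction_on with
  | _ n ih =>
    intro cs hlen
    rw [removalGo]
    split
    · rename_i h
      rw [h]
      rfl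
    · rename_i c rest h
      have hlenr : rest.length + 1 = cs.length := by
        have := congrArg List.length h
        simpa [PySem.Chars.lower] using this.symm
      have hrest : PySem.Chars.lower rest = rest := by
        have h2 := lower_idem cs
        rw [h] at h2
        simpa [PySem.Chars.lower] using congrArg List.tail h2
      have hih : removalGo rest = rest.filter PySem.Chars.isalpha := by
        rw [ih rest.length (by omega) rest rfl, hrest]
      rw [h]
      split_ifs with h1 h2 h3 <;>
        simp_all [PySem.Chars.isalnum]

-- ===== VERDICT (by name: the statement is the Claim_ definition above) =====
theorem removal_spec : Claim_equal_removal := by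
  intro s _
  unfold Spec_removal removal removal_alt
  rw [removalGo_eq_filter_aux s.toList.length s.toList rfl]
  simp [PySem.List.foldl_append_if PySem.Chars.isalpha (fun c => c)]
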